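-- pv_equiv track=rewrite | github.com/zdx3578/arc-dsl | dsl2.py | is_position_swapped
-- ===== SOURCE A (Python) =====
-- from collections import Counter, defaultdict
--
-- def is_position_swapped(diff1: defaultdict, diff2: defaultdict) -> bool:
--     for value1, positions1 in diff1.items():
--         found_swap = False
--         for value2, positions2 in diff2.items():
--             # 跳过相同 value 的情况，只检查不同 value 的互换
--             if value1 == value2:
--                 continue
--             # 检查 positions 是否一致
--             if sorted(positions1) == sorted(positions2):
--                 found_swap = True
--                 break
--         # 如果当前 value1 没有找到对应的交换关系，返回 False
--         if not found_swap:
--             return False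
--     return True
-- ===== SOURCE B (Python) =====
-- from collections import defaultdict
--
-- def is_position_swapped(diff1: defaultdict, diff2: defaultdict) -> bool:
--     # Index diff2 once: sorted-positions tuple -> set of values having those positions,
--     index = {}
--     for value2, positions2 in diff2.items():
--         index.setdefault(tuple(sorted(positions2)), set()).add(value2)
--     # One lookup per diff1 entry: a swap partner exists iff the indexed value set
--     # contains some value different from value1.
--     for value1, positions1 in diff1.items():
--         vals = index.get(tuple(sorted(positions1)), ())
--         if not any(v != value1 for v in vals):
--             return False
--     return True
-- ===== Notes on version B (the rewrite author's own statement) =====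
-- stated objective: alternative
-- what changed: Replaces the nested scan of diff2 for every diff1 entry by a hash index built once (sorted-positions tuple -> set of values), so each diff1 entry becomes a single dictionary lookup; it trades A's early-exit inner scan for one up-front indexing pass.
import Mathlib
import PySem

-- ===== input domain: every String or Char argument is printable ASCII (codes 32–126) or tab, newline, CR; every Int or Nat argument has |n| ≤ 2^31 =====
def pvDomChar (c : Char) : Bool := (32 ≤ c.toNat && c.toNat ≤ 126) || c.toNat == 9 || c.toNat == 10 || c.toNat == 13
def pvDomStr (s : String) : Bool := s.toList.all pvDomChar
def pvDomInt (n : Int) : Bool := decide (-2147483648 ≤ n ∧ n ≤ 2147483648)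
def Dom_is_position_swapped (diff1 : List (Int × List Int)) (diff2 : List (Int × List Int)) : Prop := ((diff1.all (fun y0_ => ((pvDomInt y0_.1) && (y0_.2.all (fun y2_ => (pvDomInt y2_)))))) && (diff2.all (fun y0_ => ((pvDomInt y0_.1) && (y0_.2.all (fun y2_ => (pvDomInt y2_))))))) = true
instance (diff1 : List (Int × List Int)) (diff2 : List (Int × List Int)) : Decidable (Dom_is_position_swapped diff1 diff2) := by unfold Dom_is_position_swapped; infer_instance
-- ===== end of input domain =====

-- B replaces A's per-entry scan of diff2 by an index of diff2 built once
-- (sorted positions -> set of values), one lookup per diff1 entry; objective: alternative.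


-- ===== PORT A =====
-- inner 'for value2, positions2 in diff2.items(): … break' loop of A
def pvInnerA (v1 : Int) (p1 : List Int) : List (Int × List Int) → Bool
  | [] => false
  | (v2, p2) :: rest =>
    if v1 = v2 then pvInnerA v1 p1 rest
    else if PySem.List.sorted p1 (fun x => x) false = PySem.List.sorted p2 (fun x => x) false then
      true
    else pvInnerA v1 p1 rest

def pvOuterA (diff2 : List (Int × List Int)) : List (Int × List Int) → Bool
  | [] => true
  | (v1, p1) :: rest =>
    if pvInnerA v1 p1 diff2 then pvOuterA diff2 rest else false

def is_position_swapped (diff1 : List (Int × List Int)) (diff2 : List (Int × List Int)) : Bool :=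
  pvOuterA diff2 diff1

-- ===== PORT B =====
-- sorted-positions key
def pvKey (p : List Int) : List Int := PySem.List.sorted p (fun x => x) false

-- index.setdefault(tuple(sorted(positions2)), set()).add(value2), over diff2
def pvBuildIndex (diff2 : List (Int × List Int)) : PySem.Dict (List Int) (PySem.Set Int) :=
  diff2.foldl (fun d vp => d.modify (pvKey vp.2) PySem.Set.empty (fun s => PySem.Set.add s vp.1))
    PySem.Dict.empty

-- second loop of B: one lookup per diff1 entry
def pvLoopB (index : PySem.Dict (List Int) (PySem.Set Int)) : List (Int × List Int) → Bool
  | [] => true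
  | (v1, p1) :: rest =>
    if (index.getD (pvKey p1) PySem.Set.empty).any (fun v => v != v1) then pvLoopB index rest
    else false

def is_position_swapped_alt (diff1 : List (Int × List Int)) (diff2 : List (Int × List Int)) : Bool :=
  pvLoopB (pvBuildIndex diff2) diff1

-- ===== PRECONDITION & SPEC =====
def Spec_is_position_swapped (diff1 : List (Int × List Int)) (diff2 : List (Int × List Int)) (out : Bool) : Prop := out = is_position_swapped_alt diff1 diff2
instance (diff1 : List (Int × List Int)) (diff2 : List (Int × List Int)) (out : Bool) : Decidable (Spec_is_position_swapped diff1 diff2 out) := by unfold Spec_is_position_swapped; infer_instance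

-- ===== CLAIM (what is proved, stated in full; the proofs are below) =====
def Claim_equal_is_position_swapped : Prop := ∀ (diff1 : List (Int × List Int)) (diff2 : List (Int × List Int)), Dom_is_position_swapped diff1 diff2 → Spec_is_position_swapped diff1 diff2 (is_position_swapped diff1 diff2)

-- ===== LEMMAS AND PROOFS =====

-- membership in the built index: v is filed under key k iff some (v, p) in diff2 has pvKey p = k
lemma mem_getD_buildfold (l : List (Int × List Int)) (d : PySem.Dict (List Int) (PySem.Set Int))
    (k : List Int) (v : Int) :
    v ∈ (l.foldl (fun d vp => d.modify (pvKey vp.2) PySem.Set.empty (fun s => PySem.Set.add s vp.1)) d).getD k PySem.Set.empty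
      ↔ v ∈ d.getD k PySem.Set.empty ∨ ∃ p, (v, p) ∈ l ∧ pvKey p = k := by
  induction l generalizing d with
  | nil => simp
  | cons hd t ih =>
    obtain ⟨v2, p2⟩ := hd
    simp only [List.foldl_cons, ih, PySem.Dict.getD_modify, List.mem_cons, Prod.mk.injEq]
    by_cases hk : k = pvKey p2
    · subst hk
      simp only [if_true, PySem.Set.mem_add]
      constructor
      · rintro ((h | rfl) | ⟨p, hp, hpk⟩)
        · exact Or.inl h
        · exact Or.inr ⟨p2, Or.inl ⟨rfl, rfl⟩, rfl⟩
        · exact Or.inr ⟨p, Or.inr hp, hpk⟩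
      · rintro (h | ⟨p, (⟨rfl, rfl⟩ | hp), hpk⟩)
        · exact Or.inl (Or.inl h)
        · exact Or.inl (Or.inr rfl)
        · exact Or.inr ⟨p, hp, hpk⟩
    · simp only [if_neg hk]
      constructor
      · rintro (h | ⟨p, hp, hpk⟩)
        · exact Or.inl h
        · exact Or.inr ⟨p, Or.inr hp, hpk⟩
      · rintro (h | ⟨p, (⟨rfl, rfl⟩ | hp), hpk⟩)
        · exact Or.inl h
        · exact absurd hpk.symm hk
        · exact Or.inr ⟨p, hp, hpk⟩

-- A's inner scan finds a swap partner iff one exists in diff2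
lemma innerA_iff (v1 : Int) (p1 : List Int) (l : List (Int × List Int)) :
    pvInnerA v1 p1 l = true ↔ ∃ v2 p2, (v2, p2) ∈ l ∧ v1 ≠ v2 ∧ pvKey p1 = pvKey p2 := by
  induction l with
  | nil => simp [pvInnerA]
  | cons hd t ih =>
    obtain ⟨v2, p2⟩ := hd
    simp only [pvInnerA, pvKey] at *
    split_ifs with h1 h2
    · subst h1
      rw [ih]
      constructor
      · rintro ⟨a, b, hab, hne, hk⟩; exact ⟨a, b, List.mem_cons_of_mem _ hab, hne, hk⟩
      · rintro ⟨a, b, hab, hne, hk⟩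
        rcases List.mem_cons.1 hab with h | h
        · exact absurd (congrArg Prod.fst h) (by exact fun hh => hne hh.symm)
        · exact ⟨a, b, h, hne, hk⟩
    · simp only [true_iff]
      exact ⟨v2, p2, List.mem_cons_self .., h1, h2⟩
    · rw [ih]
      constructor
      · rintro ⟨a, b, hab, hne, hk⟩; exact ⟨a, b, List.mem_cons_of_mem _ hab, hne, hk⟩
      · rintro ⟨a, b, hab, hne, hk⟩
        rcases List.mem_cons.1 hab with h | h
        · obtain ⟨rfl, rfl⟩ := Prod.mk.injEq .. ▸ h; exact absurd hk h2
        · exact ⟨a, b, h, hne, hk⟩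

-- B's lookup-and-test equals A's inner scan
lemma lookup_eq_innerA (diff2 : List (Int × List Int)) (v1 : Int) (p1 : List Int) :
    ((pvBuildIndex diff2).getD (pvKey p1) PySem.Set.empty).any (fun v => v != v1)
      = pvInnerA v1 p1 diff2 := by
  rcases hb : pvInnerA v1 p1 diff2 with _ | _
  · rw [List.any_eq_false]
    intro v hv
    rw [pvBuildIndex, mem_getD_buildfold] at hv
    rcases hv with h | ⟨p, hp, hpk⟩
    · simp [PySem.Set.empty] at h
    · simp only [bne_iff_ne, ne_eq, not_not]
      by_contra hne
      have : pvInnerA v1 p1 diff2 = true :=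
        (innerA_iff v1 p1 diff2).2 ⟨v, p, hp, fun h => hne h.symm, hpk.symm⟩
      simp [hb] at this
  · rw [List.any_eq_true]
    obtain ⟨v2, p2, hm, hne, hk⟩ := (innerA_iff v1 p1 diff2).1 hb
    refine ⟨v2, ?_, by simp only [bne_iff_ne]; exact Ne.symm hne⟩
    rw [pvBuildIndex, mem_getD_buildfold]
    exact Or.inr ⟨p2, hm, hk.symm⟩

lemma outer_eq (diff2 : List (Int × List Int)) (l : List (Int × List Int)) :
    pvOuterA diff2 l = pvLoopB (pvBuildIndex diff2) l := by
  induction l with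
  | nil => rfl
  | cons hd t ih =>
    obtain ⟨v1, p1⟩ := hd
    simp only [pvOuterA, pvLoopB, lookup_eq_innerA, ih]

-- ===== VERDICT (by name: the statement is the Claim_ definition above) =====
theorem is_position_swapped_spec : Claim_equal_is_position_swapped := by
  intro diff1 diff2 _
  unfold Spec_is_position_swapped is_position_swapped is_position_swapped_alt
  exact outer_eq diff2 diff1
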